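-- pv_equiv track=rewrite | github.com/Ankorianos/BakalarskaPrace_FAV | scripts/evaluate_wer_speakers.py | assign_roles_by_length
-- ===== SOURCE A (Python) =====
-- def assign_roles_by_length(asr_texts, gt_texts):
--     asr_items = [(key, text) for key, text in asr_texts.items() if text]
--     if len(asr_items) < 2:
--         raise ValueError("V ASR JSON nebyly nalezeny dva full přepisy mluvčích.")
--
--     if not gt_texts.get("interviewer") or not gt_texts.get("interviewee"):
--         raise ValueError("V ground_truth_speakers.json chybí interviewer/interviewee text.")
--
--     asr_sorted = sorted(asr_items, key=lambda item: len(item[1]))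
--     gt_sorted = sorted(((role, text) for role, text in gt_texts.items()), key=lambda item: len(item[1]))
--
--     mapping = {
--         gt_sorted[0][0]: asr_sorted[0][0],
--         gt_sorted[-1][0]: asr_sorted[-1][0],
--     }
--
--     return mapping
-- ===== SOURCE B (Python) =====
-- def assign_roles_by_length(asr_texts, gt_texts):
--     asr_items = [(key, text) for key, text in asr_texts.items() if text]
--     if len(asr_items) < 2:
--         raise ValueError("V ASR JSON nebyly nalezeny dva full přepisy mluvčích.")
--
--     if not gt_texts.get("interviewer") or not gt_texts.get("interviewee"):
--         raise ValueError("V ground_truth_speakers.json chybí interviewer/interviewee text.")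
--
--     def extremes(items):
--         # single pass: first minimal (strict <) and last maximal (>=) by text length
--         lo = hi = items[0]
--         for item in items[1:]:
--             if len(item[1]) < len(lo[1]):
--                 lo = item
--             if len(item[1]) >= len(hi[1]):
--                 hi = item
--         return lo, hi
--
--     asr_lo, asr_hi = extremes(asr_items)
--     gt_lo, gt_hi = extremes(list(gt_texts.items()))
--
--     return {gt_lo[0]: asr_lo[0], gt_hi[0]: asr_hi[0]}
-- ===== Notes on version B (the rewrite author's own statement) =====
-- stated objective: faster
-- what changed: Replaces the two sorted()-then-index-[0]/[-1] calls by a single linear scan per list that tracks the first minimal (strict <) and last maximal (>=) item by text length, reproducing the stable-sort tie-breaking.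
import Mathlib
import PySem

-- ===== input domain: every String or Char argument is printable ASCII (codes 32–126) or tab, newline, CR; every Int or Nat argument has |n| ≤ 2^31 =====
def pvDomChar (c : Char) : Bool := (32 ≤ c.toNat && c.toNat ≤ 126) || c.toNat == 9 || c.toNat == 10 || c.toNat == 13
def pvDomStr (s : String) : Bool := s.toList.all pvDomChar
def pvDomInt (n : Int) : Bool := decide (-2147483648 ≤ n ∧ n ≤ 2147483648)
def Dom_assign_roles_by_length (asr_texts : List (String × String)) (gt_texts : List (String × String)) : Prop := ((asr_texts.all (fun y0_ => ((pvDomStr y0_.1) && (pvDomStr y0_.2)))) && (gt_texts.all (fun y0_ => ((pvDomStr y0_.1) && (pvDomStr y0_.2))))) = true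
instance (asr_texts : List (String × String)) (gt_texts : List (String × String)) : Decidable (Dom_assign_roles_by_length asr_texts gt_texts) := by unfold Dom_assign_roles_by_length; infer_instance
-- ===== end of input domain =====

-- B replaces the two sorted()/[0]/[-1] passes by one linear scan per list keeping the
-- first minimal and last maximal item by text length (same value; O(n) instead of O(n log n)).

-- ===== PORT A =====
def assign_roles_by_length (asr_texts : List (String × String)) (gt_texts : List (String × String)) : List (String × String) :=
  let asr_items := asr_texts.filter (fun p => p.2 ≠ "")
  if asr_items.length < 2 then []   -- Python raises ValueError here; excluded by Pre_
  else if PySem.Dict.getD (PySem.Dict.mk gt_texts) "interviewer" "" = "" ∨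
          PySem.Dict.getD (PySem.Dict.mk gt_texts) "interviewee" "" = "" then []   -- ValueError; excluded by Pre_
  else
    let asr_sorted := PySem.List.sorted asr_items (fun p => PySem.Str.len p.2)
    let gt_sorted := PySem.List.sorted gt_texts (fun p => PySem.Str.len p.2)
    match PySem.List.pyGet? gt_sorted 0, PySem.List.pyGet? asr_sorted 0,
          PySem.List.pyGet? gt_sorted (-1), PySem.List.pyGet? asr_sorted (-1) with
    | some g0, some a0, some g1, some a1 =>
        ((PySem.Dict.empty.insert g0.1 a0.1).insert g1.1 a1.1).items
    | _, _, _, _ => []   -- unreachable under the guards (both lists are nonempty there)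

-- ===== PORT B =====
-- one pass: first minimal (strict <) and last maximal (≥) element by text length
def pvExtremes (x : String × String) (t : List (String × String)) : (String × String) × (String × String) :=
  t.foldl (fun s y =>
      (if PySem.Str.len y.2 < PySem.Str.len s.1.2 then y else s.1,
       if PySem.Str.len s.2.2 ≤ PySem.Str.len y.2 then y else s.2)) (x, x)

def assign_roles_by_length_alt (asr_texts : List (String × String)) (gt_texts : List (String × String)) : List (String × String) :=
  let asr_items := asr_texts.filter (fun p => p.2 ≠ "")
  if asr_items.length < 2 then []   -- B raises the same ValueError here
  else if PySem.Dict.getD (PySem.Dict.mk gt_texts) "interviewer" "" = "" ∨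
          PySem.Dict.getD (PySem.Dict.mk gt_texts) "interviewee" "" = "" then []   -- same ValueError
  else
    match asr_items, gt_texts with
    | a :: as, g :: gs =>
        let ae := pvExtremes a as
        let ge := pvExtremes g gs
        ((PySem.Dict.empty.insert ge.1.1 ae.1.1).insert ge.2.1 ae.2.1).items
    | _, _ => []   -- unreachable under the guards

-- ===== PRECONDITION & SPEC =====
-- Pre_ excludes exactly the inputs on which A raises ValueError (fewer than two non-empty
-- ASR transcripts, or a missing/empty interviewer/interviewee ground-truth text); B raises there too.
def Pre_assign_roles_by_length (asr_texts : List (String × String)) (gt_texts : List (String × String)) : Prop :=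
  2 ≤ (asr_texts.filter (fun p => p.2 ≠ "")).length ∧
  PySem.Dict.getD (PySem.Dict.mk gt_texts) "interviewer" "" ≠ "" ∧
  PySem.Dict.getD (PySem.Dict.mk gt_texts) "interviewee" "" ≠ ""
instance (asr_texts : List (String × String)) (gt_texts : List (String × String)) : Decidable (Pre_assign_roles_by_length asr_texts gt_texts) := by unfold Pre_assign_roles_by_length; infer_instance

def pvWitness_assign_roles_by_length : (List (String × String)) × (List (String × String)) :=
  ([("spk0", "a"), ("spk1", "bbb")], [("interviewer", "xx"), ("interviewee", "y")])

def Spec_assign_roles_by_length (asr_texts : List (String × String)) (gt_texts : List (String × String)) (out : List (String × String)) : Prop := out = assign_roles_by_length_alt asr_texts gt_texts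
instance (asr_texts : List (String × String)) (gt_texts : List (String × String)) (out : List (String × String)) : Decidable (Spec_assign_roles_by_length asr_texts gt_texts out) := by unfold Spec_assign_roles_by_length; infer_instance

-- ===== CLAIM (what is proved, stated in full; the proofs are below) =====
def Claim_equal_assign_roles_by_length : Prop := ∀ (asr_texts : List (String × String)) (gt_texts : List (String × String)), Dom_assign_roles_by_length asr_texts gt_texts → Pre_assign_roles_by_length asr_texts gt_texts → Spec_assign_roles_by_length asr_texts gt_texts (assign_roles_by_length asr_texts gt_texts)

-- ===== LEMMAS AND PROOFS =====

theorem insertBy_ne_nil {α : Type} (bf : α → α → Bool) (x : α) (ys : List α) :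
    PySem.List.insertBy bf x ys ≠ [] := by
  cases ys with
  | nil => simp [PySem.List.insertBy]
  | cons h t => by_cases hb : bf x h <;> simp [PySem.List.insertBy, hb]

theorem head?_insertBy {α : Type} (bf : α → α → Bool) (x : α) (ys : List α) :
    (PySem.List.insertBy bf x ys).head? =
      some (match ys with | [] => x | h :: _ => if bf x h then x else h) := by
  cases ys with
  | nil => simp [PySem.List.insertBy]
  | cons h t => by_cases hb : bf x h <;> simp [PySem.List.insertBy, hb]

theorem insertBy_cons {α : Type} (key : α → Int) (x y : α) (ys : List α) :
    PySem.List.insertBy (fun a b => decide (key a < key b)) x (y :: ys) =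
      if key x < key y then x :: y :: ys
      else y :: PySem.List.insertBy (fun a b => decide (key a < key b)) x ys := by
  by_cases hb : key x < key y <;> simp [PySem.List.insertBy, hb]

theorem pairwise_insertBy {α : Type} (key : α → Int) (x : α) (ys : List α)
    (h : ys.Pairwise (fun a b => key a ≤ key b)) :
    (PySem.List.insertBy (fun a b => decide (key a < key b)) x ys).Pairwise
      (fun a b => key a ≤ key b) := by
  induction ys with
  | nil => simp [PySem.List.insertBy]
  | cons y ys ih =>
    rcases List.pairwise_cons.mp h with ⟨hh, ht⟩
    rw [insertBy_cons]
    by_cases hb : key x < key y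
    · rw [if_pos hb]
      refine List.pairwise_cons.mpr ⟨?_, List.pairwise_cons.mpr ⟨hh, ht⟩⟩
      intro b hb'
      rcases List.mem_cons.mp hb' with rfl | hbt
      · exact le_of_lt hb
      · exact le_trans (le_of_lt hb) (hh b hbt)
    · rw [if_neg hb]
      refine List.pairwise_cons.mpr ⟨?_, ih ht⟩
      intro b hb'
      rcases (PySem.List.mem_insertBy _ _ _ _).mp hb' with rfl | hbt
      · exact le_of_not_gt hb
      · exact hh b hbt

theorem getLast?_cons_ne_nil {α : Type} (y : α) (l : List α) (h : l ≠ []) :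
    (y :: l).getLast? = l.getLast? := by
  cases l with
  | nil => exact absurd rfl h
  | cons g ts => simp [List.getLast?_cons_cons]

theorem getLast?_insertBy {α : Type} (key : α → Int) (x : α) (ys : List α)
    (h : ys.Pairwise (fun a b => key a ≤ key b)) :
    (PySem.List.insertBy (fun a b => decide (key a < key b)) x ys).getLast? =
      some (match ys.getLast? with
            | none => x
            | some l => if key x < key l then l else x) := by
  induction ys with
  | nil => simp [PySem.List.insertBy]
  | cons y ys ih =>
    rcases List.pairwise_cons.mp h with ⟨hh, ht⟩
    rw [insertBy_cons]
    by_cases hb : key x < key y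
    · rw [if_pos hb]
      cases ys with
      | nil => simp [hb]
      | cons g ts =>
        have hne : (g :: ts : List α) ≠ [] := by simp
        have hl : ((g :: ts).getLast hne) ∈ (g :: ts) := List.getLast_mem hne
        have hlast : (g :: ts).getLast? = some ((g :: ts).getLast hne) :=
          List.getLast?_eq_some_getLast hne
        have hxl : key x < key ((g :: ts).getLast hne) :=
          lt_of_lt_of_le hb (hh _ hl)
        simp [List.getLast?_cons_cons, hlast, hxl]
    · rw [if_neg hb]
      have hne := insertBy_ne_nil (fun a b => decide (key a < key b)) x ys
      rw [getLast?_cons_ne_nil _ _ hne, ih ht]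
      cases ys with
      | nil => simp [hb]
      | cons g ts => simp [List.getLast?_cons_cons]

theorem foldl_insertBy_ext {α : Type} (key : α → Int) (xs : List α) :
    ∀ (acc : List α) (lo hi : α),
    acc.Pairwise (fun a b => key a ≤ key b) → acc.head? = some lo → acc.getLast? = some hi →
    (xs.foldl (fun a x => PySem.List.insertBy (fun a b => decide (key a < key b)) x a) acc).Pairwise
        (fun a b => key a ≤ key b) ∧
    (xs.foldl (fun a x => PySem.List.insertBy (fun a b => decide (key a < key b)) x a) acc).head? =
        some (xs.foldl (fun l y => if key y < key l then y else l) lo) ∧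
    (xs.foldl (fun a x => PySem.List.insertBy (fun a b => decide (key a < key b)) x a) acc).getLast? =
        some (xs.foldl (fun h y => if key h ≤ key y then y else h) hi) := by
  induction xs with
  | nil => intro acc lo hi hp hh hl; exact ⟨hp, hh, hl⟩
  | cons x t ih =>
    intro acc lo hi hp hh hl
    cases acc with
    | nil => simp at hh
    | cons a as =>
      have hh' : a = lo := by simpa using hh
      subst hh'
      have hp' := pairwise_insertBy key x _ hp
      have hhead : (PySem.List.insertBy (fun a b => decide (key a < key b)) x (a :: as)).head? =
          some (if key x < key a then x else a) := by
        simpa using head?_insertBy (fun a b => decide (key a < key b)) x (a :: as)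
      have hlast : (PySem.List.insertBy (fun a b => decide (key a < key b)) x (a :: as)).getLast? =
          some (if key x < key hi then hi else x) := by
        rw [getLast?_insertBy key x _ hp, hl]
      have e1 : (if key x < key a then x else a) = (if key x < key a then x else a) := rfl
      have e2 : (if key x < key hi then hi else x) = (if key hi ≤ key x then x else hi) := by
        rcases lt_or_ge (key x) (key hi) with h | h
        · rw [if_pos h, if_neg (not_le.mpr h)]
        · rw [if_neg (not_lt.mpr h), if_pos h]
      rw [e2] at hlast
      have := ih _ _ _ hp' hhead hlast
      simpa using this

theorem pvExtremes_fold (t : List (String × String)) :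
    ∀ (p q : String × String),
    t.foldl (fun s y =>
        (if PySem.Str.len y.2 < PySem.Str.len s.1.2 then y else s.1,
         if PySem.Str.len s.2.2 ≤ PySem.Str.len y.2 then y else s.2)) (p, q) =
      (t.foldl (fun l y => if PySem.Str.len y.2 < PySem.Str.len l.2 then y else l) p,
       t.foldl (fun h y => if PySem.Str.len h.2 ≤ PySem.Str.len y.2 then y else h) q) := by
  induction t with
  | nil => intro p q; rfl
  | cons x xs ih =>
    intro p q
    simp only [List.foldl_cons]
    exact ih _ _

theorem pvExtremes_eq (x : String × String) (t : List (String × String)) :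
    pvExtremes x t =
      (t.foldl (fun l y => if PySem.Str.len y.2 < PySem.Str.len l.2 then y else l) x,
       t.foldl (fun h y => if PySem.Str.len h.2 ≤ PySem.Str.len y.2 then y else h) x) := by
  unfold pvExtremes
  exact pvExtremes_fold t x x

-- head/last of the stable sort of a nonempty list = the two linear scans
theorem sorted_head_last (key : (String × String) → Int) (a : String × String)
    (as : List (String × String)) :
    (PySem.List.sorted (a :: as) key).head? =
        some (as.foldl (fun l y => if key y < key l then y else l) a) ∧
    (PySem.List.sorted (a :: as) key).getLast? =
        some (as.foldl (fun h y => if key h ≤ key y then y else h) a) := by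
  have hdef : PySem.List.sorted (a :: as) key =
      as.foldl (fun acc x => PySem.List.insertBy (fun p q => decide (key p < key q)) x acc) [a] := by
    rw [PySem.List.sorted_eq_foldl_insertBy]
    rfl
  have h := foldl_insertBy_ext key as [a] a a (by simp) (by simp) (by simp)
  rw [hdef]
  exact ⟨h.2.1, h.2.2⟩

theorem pyGet?_zero {α : Type} (x : α) (xs : List α) :
    PySem.List.pyGet? (x :: xs) 0 = some x := by
  simp [PySem.List.pyGet?, PySem.List.pyIdx?]

theorem pyGet?_neg_one {α : Type} (x : α) (xs : List α) :
    PySem.List.pyGet? (x :: xs) (-1) = (x :: xs).getLast? := by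
  have hlen : (0 : Int) < ((x :: xs).length : Int) := by
    simp
  simp only [PySem.List.pyGet?, PySem.List.pyIdx?]
  norm_num
  rw [List.getLast?_eq_getElem?]
  simp

theorem gt_ne_nil_of_pre (gt_texts : List (String × String))
    (h : PySem.Dict.getD (PySem.Dict.mk gt_texts) "interviewer" "" ≠ "") :
    gt_texts ≠ [] := by
  intro hnil
  subst hnil
  simp [PySem.Dict.getD, PySem.Dict.get?] at h

-- ===== VERDICT (by name: the statement is the Claim_ definition above) =====
theorem assign_roles_by_length_spec : Claim_equal_assign_roles_by_length := by
  intro asr_texts gt_texts _ hpre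
  obtain ⟨h2, hiw, hie⟩ := hpre
  unfold Spec_assign_roles_by_length assign_roles_by_length assign_roles_by_length_alt
  have hif1 : ¬ ((asr_texts.filter (fun p => p.2 ≠ "")).length < 2) := not_lt.mpr h2
  have hif2 : ¬ (PySem.Dict.getD (PySem.Dict.mk gt_texts) "interviewer" "" = "" ∨
                 PySem.Dict.getD (PySem.Dict.mk gt_texts) "interviewee" "" = "") := by
    rintro (h | h) <;> [exact hiw h; exact hie h]
  simp only [if_neg hif1, if_neg hif2]
  -- the filtered list is nonempty
  obtain ⟨a, as, hasr⟩ : ∃ a as, asr_texts.filter (fun p => p.2 ≠ "") = a :: as := by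
    cases hcase : asr_texts.filter (fun p => p.2 ≠ "") with
    | nil => rw [hcase] at h2; simp at h2
    | cons a as => exact ⟨a, as, rfl⟩
  obtain ⟨g, gs, hgt⟩ : ∃ g gs, gt_texts = g :: gs := by
    cases hcase : gt_texts with
    | nil => exact absurd hcase (gt_ne_nil_of_pre gt_texts hiw)
    | cons g gs => exact ⟨g, gs, rfl⟩
  rw [hasr, hgt]
  have ha := sorted_head_last (fun p => PySem.Str.len p.2) a as
  have hg := sorted_head_last (fun p => PySem.Str.len p.2) g gs
  -- sorted lists are nonempty cons
  obtain ⟨a0, at0, hasort⟩ : ∃ a0 at0,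
      PySem.List.sorted (a :: as) (fun p : String × String => PySem.Str.len p.2) = a0 :: at0 := by
    cases hc : PySem.List.sorted (a :: as) (fun p : String × String => PySem.Str.len p.2) with
    | nil => exact absurd hc (by simp [PySem.List.sorted_eq_nil_iff])
    | cons a0 at0 => exact ⟨a0, at0, rfl⟩
  obtain ⟨g0, gt0, hgsort⟩ : ∃ g0 gt0,
      PySem.List.sorted (g :: gs) (fun p : String × String => PySem.Str.len p.2) = g0 :: gt0 := by
    cases hc : PySem.List.sorted (g :: gs) (fun p : String × String => PySem.Str.len p.2) with
    | nil => exact absurd hc (by simp [PySem.List.sorted_eq_nil_iff])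
    | cons g0 gt0 => exact ⟨g0, gt0, rfl⟩
  rw [hasort] at ha
  rw [hgsort] at hg
  -- compute the four pyGet? values
  rw [hasort, hgsort, pyGet?_zero, pyGet?_zero, pyGet?_neg_one, pyGet?_neg_one]
  rw [ha.2, hg.2]
  have ha0 : a0 = as.foldl
      (fun l y => if PySem.Str.len y.2 < PySem.Str.len l.2 then y else l) a := by
    have := ha.1; simpa using this
  have hg0 : g0 = gs.foldl
      (fun l y => if PySem.Str.len y.2 < PySem.Str.len l.2 then y else l) g := by
    have := hg.1; simpa using this
  rw [ha0, hg0]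
  simp only [pvExtremes_eq]
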